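-- pv_equiv track=rewrite | github.com/djurazzi/GraphRec-WWW19 | run_GraphRec_example_topk_BCE.py | create_u_lists
-- ===== SOURCE A (Python) =====
-- def create_u_lists(test_u, test_v, test_r):
--     test_u_lists = {}
--     test_u_ratings = {}
--     for i in range(len(test_u)):
--         u = test_u[i]
--         if u not in test_u_lists:
--             test_u_lists[u] = []
--             test_u_ratings[u] = []
--         test_u_lists[u].append(test_v[i])
--         test_u_ratings[u].append(test_r[i])
--     # Sort descending each test_u_lists[u] by rating
--     for u in test_u_lists:
--         test_u_lists[u] = [x for _, x in sorted(zip(test_u_ratings[u], test_u_lists[u]), reverse=True)]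
--     return test_u_lists
-- ===== SOURCE B (Python) =====
-- def create_u_lists(test_u, test_v, test_r):
--     # Sort-once-then-bucket: seed keys in first-appearance order, sort all
--     # (rating, item, user) triples once by (rating, item) descending (the same
--     # tie-break A uses per bucket; stability keeps index order on ties), then
--     # distribute items to their user's list in a single pass.
--     test_u_lists = {u: [] for u in test_u}
--     for r, v, u in sorted(zip(test_r, test_v, test_u), key=lambda t: (t[0], t[1]), reverse=True):
--         test_u_lists[u].append(v)
--     return test_u_lists
-- ===== Notes on version B (the rewrite author's own statement) =====
-- stated objective: alternative
-- what changed: Replaces per-user bucketing followed by a separate sort of every bucket with one global stable sort of all (rating, item, user) triples by (rating, item) descending followed by a single bucketing pass over the sorted list.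
import Mathlib
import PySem

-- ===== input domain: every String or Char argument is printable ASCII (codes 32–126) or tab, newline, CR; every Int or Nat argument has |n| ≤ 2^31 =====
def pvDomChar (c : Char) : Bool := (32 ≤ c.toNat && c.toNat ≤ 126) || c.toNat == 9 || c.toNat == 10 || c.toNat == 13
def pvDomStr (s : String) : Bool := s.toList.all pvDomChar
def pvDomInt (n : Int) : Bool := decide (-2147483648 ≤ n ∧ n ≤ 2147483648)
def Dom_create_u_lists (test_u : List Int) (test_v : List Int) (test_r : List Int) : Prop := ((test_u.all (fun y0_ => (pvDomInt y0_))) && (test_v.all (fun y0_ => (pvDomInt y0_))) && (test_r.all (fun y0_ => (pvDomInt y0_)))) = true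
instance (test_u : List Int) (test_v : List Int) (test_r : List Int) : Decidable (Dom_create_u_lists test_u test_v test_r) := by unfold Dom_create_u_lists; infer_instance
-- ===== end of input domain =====

/- B replaces "bucket per user, then sort every bucket" by "sort all (rating, item, user)
   triples once by (rating, item) descending, then bucket in one pass" — objective: alternative.
   Pre_ excludes inputs where A raises IndexError (test_v or test_r shorter than test_u). -/


-- ===== PORT A =====
def create_u_lists (test_u : List Int) (test_v : List Int) (test_r : List Int) : List (Int × List Int) :=
  -- first loop: build test_u_lists / test_u_ratings (pair of dicts) over i in range(len(test_u))
  let st := (PySem.List.pyRange 0 (test_u.length : Int) 1).foldl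
    (fun (st : PySem.Dict Int (List Int) × PySem.Dict Int (List Int)) i =>
      let u := PySem.List.pyGetD test_u i 0   -- in range on every admitted input
      let st := if st.1.contains u then st else (st.1.insert u [], st.2.insert u [])
      (st.1.modify u [] (· ++ [PySem.List.pyGetD test_v i 0]),
       st.2.modify u [] (· ++ [PySem.List.pyGetD test_r i 0])))
    (PySem.Dict.empty, PySem.Dict.empty)
  -- second loop: test_u_lists[u] = [x for _, x in sorted(zip(ratings[u], lists[u]), reverse=True)]
  st.1.items.map (fun p =>
    (p.1, (PySem.List.sorted2 ((st.2.getD p.1 []).zip p.2) Prod.fst Prod.snd true).map Prod.snd))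

-- ===== PORT B =====
def create_u_lists_alt (test_u : List Int) (test_v : List Int) (test_r : List Int) : List (Int × List Int) :=
  -- test_u_lists = {u: [] for u in test_u}
  let d0 := test_u.foldl (fun d u => d.insert u ([] : List Int)) PySem.Dict.empty
  -- sorted(zip(test_r, test_v, test_u), key=lambda t: (t[0], t[1]), reverse=True)
  let triples := PySem.List.sorted2 ((test_r.zip test_v).zip test_u)
    (fun t => t.1.1) (fun t => t.1.2) true
  -- for r, v, u in triples: test_u_lists[u].append(v)
  (triples.foldl (fun d t => d.modify t.2 [] (· ++ [t.1.2])) d0).items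

-- ===== PRECONDITION & SPEC =====
-- Pre_ excludes exactly the inputs where A raises IndexError: test_v or test_r shorter than test_u.
def Pre_create_u_lists (test_u : List Int) (test_v : List Int) (test_r : List Int) : Prop :=
  test_u.length ≤ test_v.length ∧ test_u.length ≤ test_r.length
instance (test_u : List Int) (test_v : List Int) (test_r : List Int) : Decidable (Pre_create_u_lists test_u test_v test_r) := by unfold Pre_create_u_lists; infer_instance
def pvWitness_create_u_lists : List Int × List Int × List Int := ([1, 1, 2], [10, 20, 30], [5, 7, 5])

def Spec_create_u_lists (test_u : List Int) (test_v : List Int) (test_r : List Int) (out : List (Int × List Int)) : Prop := out = create_u_lists_alt test_u test_v test_r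
instance (test_u : List Int) (test_v : List Int) (test_r : List Int) (out : List (Int × List Int)) : Decidable (Spec_create_u_lists test_u test_v test_r out) := by unfold Spec_create_u_lists; infer_instance

-- ===== CLAIM (what is proved, stated in full; the proofs are below) =====
def Claim_equal_create_u_lists : Prop := ∀ (test_u : List Int) (test_v : List Int) (test_r : List Int), Dom_create_u_lists test_u test_v test_r → Pre_create_u_lists test_u test_v test_r → Spec_create_u_lists test_u test_v test_r (create_u_lists test_u test_v test_r)

-- ===== LEMMAS AND PROOFS =====

/-- the "before" relation of Python's `sorted(pairs, reverse=True)` on (rating, item) pairs -/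
def pvBP (a b : Int × Int) : Bool := decide (b.1 < a.1) || (!decide (a.1 < b.1) && decide (b.2 < a.2))
/-- the same relation read through the first component of a triple -/
def pvBT (a b : (Int × Int) × Int) : Bool := pvBP a.1 b.1

lemma pvBP_asymm {x y : Int × Int} (h : pvBP x y = true) : pvBP y x = false := by
  simp [pvBP] at *
  omega

lemma pvBP_trans1 {x y z : Int × Int} (h1 : pvBP x y = true) (h2 : pvBP z y = false) :
    pvBP x z = true := by
  simp [pvBP] at *
  omega

lemma pvBP_trans2 {x y z : Int × Int} (h1 : pvBP x y = true) (h2 : pvBP z y = false) :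
    pvBP z x = false := pvBP_asymm (pvBP_trans1 h1 h2)

lemma pvBT_eq (a b : (Int × Int) × Int) : pvBT a b = pvBP a.1 b.1 := rfl

lemma insertBy_cons {α : Type} (before : α → α → Bool) (x y : α) (ys : List α) :
    PySem.List.insertBy before x (y :: ys) =
      if before x y then x :: y :: ys else y :: PySem.List.insertBy before x ys := by
  simp [PySem.List.insertBy]

lemma pairwise_insertBy {α : Type} (β : α → α → Bool)
    (hA : ∀ x y, β x y = true → β y x = false)
    (hT : ∀ x y z, β x y = true → β z y = false → β z x = false)
    (x : α) (acc : List α) (h : acc.Pairwise (fun a b => β b a = false)) :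
    (PySem.List.insertBy β x acc).Pairwise (fun a b => β b a = false) := by
  induction acc with
  | nil => simp [PySem.List.insertBy]
  | cons y ys ih =>
    rcases List.pairwise_cons.1 h with ⟨hy, hys⟩
    rw [insertBy_cons]
    by_cases hxy : β x y = true
    · simp only [hxy, if_true]
      refine List.pairwise_cons.2 ⟨?_, h⟩
      intro z hz
      rcases List.mem_cons.1 hz with rfl | hz'
      · exact hA _ _ hxy
      · exact hT x y z hxy (hy z hz')
    · simp only [hxy, Bool.false_eq_true, if_false]
      refine List.pairwise_cons.2 ⟨?_, ih hys⟩
      intro z hz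
      rcases (PySem.List.mem_insertBy _ _ _ _).1 hz with rfl | hz'
      · simpa using hxy
      · exact hy z hz'

lemma filter_insertBy {α : Type} (β : α → α → Bool)
    (hT1 : ∀ x y z, β x y = true → β z y = false → β x z = true)
    (q : α → Bool) (x : α) (acc : List α) (h : acc.Pairwise (fun a b => β b a = false)) :
    (PySem.List.insertBy β x acc).filter q =
      if q x then PySem.List.insertBy β x (acc.filter q) else acc.filter q := by
  induction acc with
  | nil => by_cases hq : q x <;> simp [PySem.List.insertBy, hq]
  | cons y ys ih =>
    rcases List.pairwise_cons.1 h with ⟨hy, hys⟩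
    rw [insertBy_cons]
    by_cases hxy : β x y = true
    · rw [if_pos hxy]
      by_cases hqx : q x = true
      · rw [if_pos hqx]
        by_cases hqy : q y = true
        · rw [List.filter_cons_of_pos hqx, List.filter_cons_of_pos hqy,
            insertBy_cons, if_pos hxy]
        · rw [List.filter_cons_of_pos hqx, List.filter_cons_of_neg (by simp [hqy])]
          cases hfy : ys.filter q with
          | nil => simp [PySem.List.insertBy]
          | cons z zs =>
            have hzys : z ∈ ys := List.mem_of_mem_filter (hfy ▸ List.mem_cons_self ..)
            have hxz : β x z = true := hT1 x y z hxy (hy z hzys)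
            rw [insertBy_cons, if_pos hxz]
      · rw [if_neg hqx, List.filter_cons_of_neg (by simp [hqx])]
    · rw [if_neg hxy]
      by_cases hqy : q y = true
      · simp only [List.filter_cons_of_pos hqy]
        rw [ih hys]
        by_cases hqx : q x = true
        · rw [if_pos hqx, if_pos hqx, insertBy_cons, if_neg hxy]
        · rw [if_neg hqx, if_neg hqx]
      · simp only [List.filter_cons_of_neg (show ¬ q y = true by simp [hqy])]
        rw [ih hys]

lemma filter_foldl_insertBy {α : Type} (β : α → α → Bool)
    (hA : ∀ x y, β x y = true → β y x = false)
    (hT : ∀ x y z, β x y = true → β z y = false → β z x = false)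
    (hT1 : ∀ x y z, β x y = true → β z y = false → β x z = true)
    (q : α → Bool) (ts : List α) :
    ∀ (acc : List α), acc.Pairwise (fun a b => β b a = false) →
    (ts.foldl (fun a t => PySem.List.insertBy β t a) acc).filter q =
      (ts.filter q).foldl (fun a t => PySem.List.insertBy β t a) (acc.filter q) := by
  induction ts with
  | nil => intro acc _; rfl
  | cons t ts ih =>
    intro acc hacc
    have hacc' := pairwise_insertBy β hA hT t acc hacc
    simp only [List.foldl_cons, List.filter_cons]
    by_cases hqt : q t = true
    · simp only [hqt, if_true, List.foldl_cons, ih _ hacc', filter_insertBy β hT1 q t acc hacc]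
    · simp only [hqt, Bool.false_eq_true, if_false, ih _ hacc',
        filter_insertBy β hT1 q t acc hacc]

lemma map_fst_insertBy (x : (Int × Int) × Int) (acc : List ((Int × Int) × Int)) :
    (PySem.List.insertBy pvBT x acc).map Prod.fst =
      PySem.List.insertBy pvBP x.1 (acc.map Prod.fst) := by
  induction acc with
  | nil => simp [PySem.List.insertBy]
  | cons y ys ih =>
    rw [insertBy_cons]
    by_cases h : pvBT x y = true
    · simp [h, insertBy_cons, (pvBT_eq x y) ▸ h]
    · have h' : pvBP x.1 y.1 = false := by simpa [pvBT_eq] using h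
      simp [h, insertBy_cons, h', ih]

lemma map_fst_foldl_insertBy (ts : List ((Int × Int) × Int)) :
    ∀ acc, (ts.foldl (fun a t => PySem.List.insertBy pvBT t a) acc).map Prod.fst =
      (ts.map Prod.fst).foldl (fun a t => PySem.List.insertBy pvBP t a) (acc.map Prod.fst) := by
  induction ts with
  | nil => intro acc; rfl
  | cons t ts ih => intro acc; simp only [List.foldl_cons, List.map_cons, ih, map_fst_insertBy]

lemma sorted2T_eq (ts : List ((Int × Int) × Int)) :
    PySem.List.sorted2 ts (fun t => t.1.1) (fun t => t.1.2) true =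
      ts.foldl (fun a t => PySem.List.insertBy pvBT t a) [] := rfl

lemma sorted2P_eq (ps : List (Int × Int)) :
    PySem.List.sorted2 ps Prod.fst Prod.snd true =
      ps.foldl (fun a t => PySem.List.insertBy pvBP t a) [] := rfl

/-- bucket of user u among the (rating, item, user) triples -/
def pvBkt (u : Int) (ts : List ((Int × Int) × Int)) : List ((Int × Int) × Int) :=
  ts.filter (fun t => t.2 == u)

/-- the key fact: filtering a bucket out of the one global descending sort gives exactly the
    descending sort of that bucket's (rating, item) pairs -/
lemma bucket_of_sorted (u : Int) (zs : List ((Int × Int) × Int)) :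
    (pvBkt u (PySem.List.sorted2 zs (fun t => t.1.1) (fun t => t.1.2) true)).map
        (fun t => t.1.2) =
      (PySem.List.sorted2 ((pvBkt u zs).map Prod.fst) Prod.fst Prod.snd true).map Prod.snd := by
  have hA : ∀ x y, pvBT x y = true → pvBT y x = false := fun x y h => pvBP_asymm h
  have hT : ∀ x y z, pvBT x y = true → pvBT z y = false → pvBT z x = false :=
    fun x y z h1 h2 => pvBP_trans2 h1 h2
  have hT1 : ∀ x y z, pvBT x y = true → pvBT z y = false → pvBT x z = true :=
    fun x y z h1 h2 => pvBP_trans1 h1 h2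
  have h1 : pvBkt u (PySem.List.sorted2 zs (fun t => t.1.1) (fun t => t.1.2) true) =
      PySem.List.sorted2 (pvBkt u zs) (fun t => t.1.1) (fun t => t.1.2) true := by
    rw [sorted2T_eq, sorted2T_eq, pvBkt, pvBkt,
      filter_foldl_insertBy pvBT hA hT hT1 (fun t => t.2 == u) zs [] (List.Pairwise.nil)]
    rfl
  have h2 : (PySem.List.sorted2 (pvBkt u zs) (fun t => t.1.1) (fun t => t.1.2) true).map
      Prod.fst = PySem.List.sorted2 ((pvBkt u zs).map Prod.fst) Prod.fst Prod.snd true := by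
    rw [sorted2T_eq, sorted2P_eq, map_fst_foldl_insertBy]; rfl
  calc (pvBkt u (PySem.List.sorted2 zs (fun t => t.1.1) (fun t => t.1.2) true)).map
        (fun t => t.1.2)
      = ((pvBkt u (PySem.List.sorted2 zs (fun t => t.1.1) (fun t => t.1.2) true)).map
          Prod.fst).map Prod.snd := by simp
    _ = _ := by rw [h1, h2]

-- ===== dict-fold characterizations =====

/-- zip(test_r, test_v, test_u) -/
def pvZs (tu tv tr : List Int) : List ((Int × Int) × Int) := (tr.zip tv).zip tu

/-- A's loop body, re-read over a triple instead of an index -/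
def pvAzstep (st : PySem.Dict Int (List Int) × PySem.Dict Int (List Int))
    (t : (Int × Int) × Int) : PySem.Dict Int (List Int) × PySem.Dict Int (List Int) :=
  let st := if st.1.contains t.2 then st else (st.1.insert t.2 [], st.2.insert t.2 [])
  (st.1.modify t.2 [] (· ++ [t.1.2]), st.2.modify t.2 [] (· ++ [t.1.1]))

lemma get?_mk_map (ks : List Int) (g : Int → List Int) (x : Int) :
    (PySem.Dict.mk (ks.map (fun k => (k, g k)))).get? x =
      if x ∈ ks then some (g x) else none := by
  induction ks with
  | nil => simp [PySem.Dict.get?]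
  | cons k ks ih =>
    simp only [List.map_cons, PySem.Dict.get?_mk_cons, ih]
    by_cases h : k = x
    · subst h; simp
    · have h' : ¬ x = k := fun hx => h hx.symm
      simp [h, h', List.mem_cons]

lemma contains_mk_map (ks : List Int) (g : Int → List Int) (x : Int) :
    (PySem.Dict.mk (ks.map (fun k => (k, g k)))).contains x = decide (x ∈ ks) := by
  induction ks with
  | nil => simp [PySem.Dict.contains]
  | cons k ks ih =>
    simp only [List.map_cons, PySem.Dict.contains, List.any_cons] at *
    by_cases h : k = x
    · subst h; simp
    · have h' : ¬ x = k := fun hx => h hx.symm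
      simp [h, h', ih, List.mem_cons]

lemma modify_mk_map (ks : List Int) (g : Int → List Int) (x : Int) (f : List Int → List Int)
    (hx : x ∈ ks) :
    (PySem.Dict.mk (ks.map (fun k => (k, g k)))).modify x [] f =
      PySem.Dict.mk (ks.map (fun k => (k, if k = x then f (g x) else g k))) := by
  unfold PySem.Dict.modify PySem.Dict.getD
  rw [get?_mk_map, if_pos hx]
  unfold PySem.Dict.insert
  rw [show (PySem.Dict.mk (ks.map (fun k => (k, g k)))).contains x = true by
    rw [contains_mk_map]; simpa using hx]
  simp only [if_true]
  apply PySem.Dict.ext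
  simp only [List.map_map]
  exact List.map_congr_left (fun k _ => by
    by_cases h : k = x
    · subst h; simp
    · simp [h, Function.comp])

lemma insert_mk_map_new (ks : List Int) (g : Int → List Int) (x : Int) (hx : x ∉ ks)
    (v : List Int) :
    (PySem.Dict.mk (ks.map (fun k => (k, g k)))).insert x v =
      PySem.Dict.mk (ks.map (fun k => (k, g k)) ++ [(x, v)]) := by
  unfold PySem.Dict.insert
  rw [show (PySem.Dict.mk (ks.map (fun k => (k, g k)))).contains x = false by
    rw [contains_mk_map]; simpa using hx]
  simp

lemma ofList_append_singleton (l : List Int) (x : Int) :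
    PySem.Set.ofList (l ++ [x]) = PySem.Set.add (PySem.Set.ofList l) x := by
  unfold PySem.Set.ofList
  rw [List.foldl_append]
  rfl

lemma add_eq (s : PySem.Set Int) (x : Int) :
    PySem.Set.add s x = if x ∈ s then s else s ++ [x] := by
  by_cases h : x ∈ s <;> simp [PySem.Set.add, PySem.Set.contains, h]

lemma pvBkt_append (k : Int) (zs : List ((Int × Int) × Int)) (t : (Int × Int) × Int) :
    pvBkt k (zs ++ [t]) = pvBkt k zs ++ if t.2 == k then [t] else [] := by
  simp [pvBkt, List.filter_append, List.filter_cons]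

lemma pvBkt_cons (k : Int) (t : (Int × Int) × Int) (ts : List ((Int × Int) × Int)) :
    pvBkt k (t :: ts) = (if t.2 == k then [t] else []) ++ pvBkt k ts := by
  by_cases h : t.2 == k <;> simp [pvBkt, h]

lemma pvBkt_eq_nil (k : Int) (zs : List ((Int × Int) × Int)) (h : k ∉ zs.map Prod.snd) :
    pvBkt k zs = [] := by
  refine List.filter_eq_nil_iff.2 (fun t ht => ?_)
  simp only [beq_iff_eq]
  intro he
  exact h (he ▸ List.mem_map_of_mem ht)

/-- the "insert-if-absent then append" step on a characterized dict -/
lemma pv_bump (ks : List Int) (g : Int → List Int) (x : Int) (val : Int)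
    (hnil : x ∉ ks → g x = []) :
    ((if decide (x ∈ ks) = true then PySem.Dict.mk (ks.map (fun k => (k, g k)))
      else (PySem.Dict.mk (ks.map (fun k => (k, g k)))).insert x []).modify x [] (· ++ [val])) =
      PySem.Dict.mk ((PySem.Set.add ks x).map (fun k => (k, if k = x then g x ++ [val] else g k))) := by
  by_cases hx : x ∈ ks
  · rw [if_pos (by simpa using hx), modify_mk_map ks g x _ hx, add_eq, if_pos hx]
  · rw [if_neg (by simpa using hx), insert_mk_map_new ks g x hx []]
    have hg : ([] : List Int) = g x := (hnil hx).symm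
    have hitems : ks.map (fun k => (k, g k)) ++ [(x, ([] : List Int))] =
        (ks ++ [x]).map (fun k => (k, g k)) := by
      rw [List.map_append, List.map_singleton, hg]
    rw [hitems, modify_mk_map (ks ++ [x]) g x _ (by simp), add_eq, if_neg hx]

lemma A_zfold_char (zs : List ((Int × Int) × Int)) :
    zs.foldl pvAzstep (PySem.Dict.empty, PySem.Dict.empty) =
      (PySem.Dict.mk ((PySem.Set.ofList (zs.map Prod.snd)).map
          (fun k => (k, (pvBkt k zs).map (fun t => t.1.2)))),
       PySem.Dict.mk ((PySem.Set.ofList (zs.map Prod.snd)).map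
          (fun k => (k, (pvBkt k zs).map (fun t => t.1.1))))) := by
  induction zs using List.reverseRecOn with
  | nil => rfl
  | append_singleton zs t ih =>
    rw [List.foldl_append, List.foldl_cons, List.foldl_nil, ih]
    have hnilv : t.2 ∉ PySem.Set.ofList (zs.map Prod.snd) →
        (pvBkt t.2 zs).map (fun t => t.1.2) = [] := fun h => by
      rw [pvBkt_eq_nil t.2 zs (fun hm => h ((PySem.Set.mem_ofList _ _).2 hm))]; rfl
    have hnilr : t.2 ∉ PySem.Set.ofList (zs.map Prod.snd) →
        (pvBkt t.2 zs).map (fun t => t.1.1) = [] := fun h => by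
      rw [pvBkt_eq_nil t.2 zs (fun hm => h ((PySem.Set.mem_ofList _ _).2 hm))]; rfl
    show pvAzstep _ t = _
    unfold pvAzstep
    rw [show (PySem.Dict.mk ((PySem.Set.ofList (zs.map Prod.snd)).map
        (fun k => (k, (pvBkt k zs).map (fun t => t.1.2))))).contains t.2 =
        decide (t.2 ∈ PySem.Set.ofList (zs.map Prod.snd)) from contains_mk_map _ _ _]
    have step1 := pv_bump (PySem.Set.ofList (zs.map Prod.snd))
      (fun k => (pvBkt k zs).map (fun t => t.1.2)) t.2 t.1.2 hnilv
    have step2 := pv_bump (PySem.Set.ofList (zs.map Prod.snd))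
      (fun k => (pvBkt k zs).map (fun t => t.1.1)) t.2 t.1.1 hnilr
    by_cases hc : t.2 ∈ PySem.Set.ofList (zs.map Prod.snd)
    · rw [if_pos (by simpa using hc)]
      rw [if_pos (by simpa using hc)] at step1 step2
      refine Prod.ext ?_ ?_ <;> simp only []
      · rw [step1, List.map_append, List.map_singleton, ofList_append_singleton, add_eq,
          if_pos hc]
        exact congrArg PySem.Dict.mk (List.map_congr_left (fun k _ => by
          by_cases h : k = t.2
          · subst h; simp [pvBkt_append]
          · have : ¬ (t.2 == k) = true := by simpa using fun he => h he.symm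
            simp [h, pvBkt_append, this]))
      · rw [step2, List.map_append, List.map_singleton, ofList_append_singleton, add_eq,
          if_pos hc]
        exact congrArg PySem.Dict.mk (List.map_congr_left (fun k _ => by
          by_cases h : k = t.2
          · subst h; simp [pvBkt_append]
          · have : ¬ (t.2 == k) = true := by simpa using fun he => h he.symm
            simp [h, pvBkt_append, this]))
    · rw [if_neg (by simpa using hc)]
      rw [if_neg (by simpa using hc)] at step1 step2
      refine Prod.ext ?_ ?_ <;> simp only []
      · rw [step1, List.map_append, List.map_singleton, ofList_append_singleton]
        exact congrArg PySem.Dict.mk (List.map_congr_left (fun k _ => by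
          by_cases h : k = t.2
          · subst h; simp [pvBkt_append]
          · have : ¬ (t.2 == k) = true := by simpa using fun he => h he.symm
            simp [h, pvBkt_append, this]))
      · rw [step2, List.map_append, List.map_singleton, ofList_append_singleton]
        exact congrArg PySem.Dict.mk (List.map_congr_left (fun k _ => by
          by_cases h : k = t.2
          · subst h; simp [pvBkt_append]
          · have : ¬ (t.2 == k) = true := by simpa using fun he => h he.symm
            simp [h, pvBkt_append, this]))

lemma seed_char (us : List Int) :
    us.foldl (fun d u => d.insert u ([] : List Int)) PySem.Dict.empty =
      PySem.Dict.mk ((PySem.Set.ofList us).map (fun k => (k, ([] : List Int)))) := by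
  induction us using List.reverseRecOn with
  | nil => rfl
  | append_singleton us u ih =>
    rw [List.foldl_append, List.foldl_cons, List.foldl_nil, ih, ofList_append_singleton, add_eq]
    by_cases h : u ∈ PySem.Set.ofList us
    · rw [if_pos h]
      unfold PySem.Dict.insert
      rw [show (PySem.Dict.mk ((PySem.Set.ofList us).map
          (fun k => (k, ([] : List Int))))).contains u = true by
        rw [contains_mk_map]; simpa using h]
      simp only [if_true]
      refine congrArg PySem.Dict.mk ?_
      rw [List.map_map]
      exact List.map_congr_left (fun k _ => by
        by_cases hk : k = u
        · subst hk; simp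
        · simp [hk, Function.comp])
    · rw [if_neg h, insert_mk_map_new _ _ _ h, List.map_append]
      rfl

lemma B_fold_char (ts : List ((Int × Int) × Int)) :
    ∀ (ks : List Int) (g : Int → List Int), (∀ t ∈ ts, t.2 ∈ ks) →
    (ts.foldl (fun d t => d.modify t.2 [] (· ++ [t.1.2]))
        (PySem.Dict.mk (ks.map (fun k => (k, g k))))).items =
      ks.map (fun k => (k, g k ++ (pvBkt k ts).map (fun t => t.1.2))) := by
  induction ts with
  | nil => intro ks g _; simp [pvBkt]
  | cons t ts ih =>
    intro ks g hmem
    rw [List.foldl_cons, modify_mk_map ks g t.2 _ (hmem t List.mem_cons_self),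
      ih ks _ (fun t' ht' => hmem t' (List.mem_cons_of_mem t ht'))]
    exact List.map_congr_left (fun k _ => by
      by_cases h : k = t.2
      · subst h; simp [pvBkt_cons]
      · have : ¬ (t.2 == k) = true := by simpa using fun he => h he.symm
        simp [h, pvBkt_cons, this])

lemma A_range_take (tu tv tr : List Int) (hv : tu.length ≤ tv.length)
    (hr : tu.length ≤ tr.length) :
    ∀ (k : Nat), k ≤ tu.length → ∀ st,
    (PySem.List.pyRange 0 (k : Int) 1).foldl
      (fun (st : PySem.Dict Int (List Int) × PySem.Dict Int (List Int)) i =>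
        let u := PySem.List.pyGetD tu i 0
        let st := if st.1.contains u then st else (st.1.insert u [], st.2.insert u [])
        (st.1.modify u [] (· ++ [PySem.List.pyGetD tv i 0]),
         st.2.modify u [] (· ++ [PySem.List.pyGetD tr i 0]))) st =
      ((pvZs tu tv tr).take k).foldl pvAzstep st := by
  have hzlen : (pvZs tu tv tr).length = tu.length := by
    simp [pvZs, List.length_zip]; omega
  intro k
  induction k with
  | zero => intro _ st; simp [PySem.List.pyRange]
  | succ k ih =>
    intro hk st
    have hk' : k ≤ tu.length := by omega
    have hklt : k < (pvZs tu tv tr).length := by omega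
    have hcast : ((k + 1 : Nat) : Int) = (k : Int) + 1 := by push_cast; ring
    have htu : k < tu.length := by omega
    have htv : k < tv.length := by omega
    have htr : k < tr.length := by omega
    have hget : (pvZs tu tv tr)[k] = ((tr[k], tv[k]), tu[k]) := by
      simp [pvZs, List.getElem_zip]
    rw [hcast, PySem.List.pyRange_one_succ_right (by positivity), List.foldl_append,
      ih hk' st, List.take_add_one, List.getElem?_eq_getElem hklt]
    simp only [Option.toList_some, List.foldl_append, List.foldl_cons, List.foldl_nil]
    rw [hget]
    unfold pvAzstep
    rw [show PySem.List.pyGetD tu ((k : Nat) : Int) 0 = tu[k] by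
      rw [PySem.List.pyGetD_natCast, List.getD_eq_getElem _ _ htu],
      show PySem.List.pyGetD tv ((k : Nat) : Int) 0 = tv[k] by
      rw [PySem.List.pyGetD_natCast, List.getD_eq_getElem _ _ htv],
      show PySem.List.pyGetD tr ((k : Nat) : Int) 0 = tr[k] by
      rw [PySem.List.pyGetD_natCast, List.getD_eq_getElem _ _ htr]]

-- ===== VERDICT (by name: the statement is the Claim_ definition above) =====
theorem create_u_lists_spec : Claim_equal_create_u_lists := by
  intro tu tv tr _ hPre
  obtain ⟨hv, hr⟩ := hPre
  have hzlen : (pvZs tu tv tr).length = tu.length := by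
    simp [pvZs, List.length_zip]; omega
  have hmapsnd : (pvZs tu tv tr).map Prod.snd = tu := by
    apply List.map_snd_zip
    simp [List.length_zip]; omega
  unfold Spec_create_u_lists create_u_lists create_u_lists_alt
  rw [show ((tr.zip tv).zip tu : List ((Int × Int) × Int)) = pvZs tu tv tr from rfl,
    A_range_take tu tv tr hv hr tu.length le_rfl,
    List.take_of_length_le (le_of_eq hzlen), A_zfold_char, seed_char, hmapsnd]
  have hmem : ∀ t ∈ PySem.List.sorted2 (pvZs tu tv tr) (fun t => t.1.1) (fun t => t.1.2) true,
      t.2 ∈ PySem.Set.ofList tu := by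
    intro t ht
    have ht' : t ∈ pvZs tu tv tr :=
      (PySem.List.sorted2_perm (pvZs tu tv tr) _ _ true).mem_iff.1 ht
    exact (PySem.Set.mem_ofList _ _).2 (hmapsnd ▸ List.mem_map_of_mem ht')
  rw [B_fold_char (PySem.List.sorted2 (pvZs tu tv tr) (fun t => t.1.1) (fun t => t.1.2) true)
    (PySem.Set.ofList tu) (fun _ => []) hmem]
  simp only [List.map_map, List.nil_append]
  apply List.map_congr_left
  intro k hk
  simp only [Function.comp_apply]
  have hgetD : (PySem.Dict.mk ((PySem.Set.ofList tu).map
      (fun k => (k, (pvBkt k (pvZs tu tv tr)).map (fun t => t.1.1))))).getD k [] =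
      (pvBkt k (pvZs tu tv tr)).map (fun t => t.1.1) := by
    unfold PySem.Dict.getD
    rw [get?_mk_map, if_pos hk]
    rfl
  rw [hgetD]
  have hzip : ((pvBkt k (pvZs tu tv tr)).map (fun t => t.1.1)).zip
      ((pvBkt k (pvZs tu tv tr)).map (fun t => t.1.2)) =
      (pvBkt k (pvZs tu tv tr)).map Prod.fst := by
    rw [List.zip_map']
  rw [hzip, bucket_of_sorted k (pvZs tu tv tr)]
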